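-- pv_equiv track=rewrite | github.com/Air2air/z-beam-generator | validators/centralized_validator.py | _get_material_category
-- ===== SOURCE A (Python) =====
-- def _get_material_category(subject: str) -> str:
--     """Determine material category from subject name."""
--     subject_lower = subject.lower()
--     if any(term in subject_lower for term in ['ceramic', 'alumina', 'zirconia', 'porcelain', 'stoneware', 'kaolin']):
--         return 'ceramic'
--     elif any(term in subject_lower for term in ['metal', 'aluminum', 'copper', 'steel', 'titanium', 'gold', 'silver', 'brass', 'bronze']):
--         return 'metal'
--     elif any(term in subject_lower for term in ['glass', 'silica', 'borosilicate', 'tempered']):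
--         return 'glass'
--     elif any(term in subject_lower for term in ['composite', 'fiber', 'carbon', 'epoxy', 'polymer', 'resin', 'kevlar']):
--         return 'composite'
--     elif any(term in subject_lower for term in ['plastic', 'polymer', 'rubber', 'elastomer', 'thermoplastic']):
--         return 'plastic'
--     elif any(term in subject_lower for term in ['stone', 'granite', 'marble', 'quartzite', 'limestone']):
--         return 'stone'
--     elif any(term in subject_lower for term in ['masonry', 'brick', 'concrete', 'mortar', 'stucco']):
--         return 'masonry'
--     elif any(term in subject_lower for term in ['wood', 'timber', 'lumber', 'oak', 'pine']):
--         return 'wood'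
--     else:
--         return 'material'
-- ===== SOURCE B (Python) =====
-- # B: inverted term->category map + two-stage match/resolve; objective: alternative.
-- # Instead of ordered per-category checks with early exit, B matches every keyword
-- # of a flat term->category dict against the subject (the duplicate 'polymer' maps
-- # only to 'composite', which is what A's branch order makes the reachable value),
-- # collecting the set of matched categories, then resolves the winner by priority.
-- _CATEGORY_OF_TERM = {
--     'ceramic': 'ceramic', 'alumina': 'ceramic', 'zirconia': 'ceramic',
--     'porcelain': 'ceramic', 'stoneware': 'ceramic', 'kaolin': 'ceramic',
--     'metal': 'metal', 'aluminum': 'metal', 'copper': 'metal', 'steel': 'metal',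
--     'titanium': 'metal', 'gold': 'metal', 'silver': 'metal', 'brass': 'metal',
--     'bronze': 'metal',
--     'glass': 'glass', 'silica': 'glass', 'borosilicate': 'glass', 'tempered': 'glass',
--     'composite': 'composite', 'fiber': 'composite', 'carbon': 'composite',
--     'epoxy': 'composite', 'polymer': 'composite', 'resin': 'composite',
--     'kevlar': 'composite',
--     'plastic': 'plastic', 'rubber': 'plastic', 'elastomer': 'plastic',
--     'thermoplastic': 'plastic',
--     'stone': 'stone', 'granite': 'stone', 'marble': 'stone',
--     'quartzite': 'stone', 'limestone': 'stone',
--     'masonry': 'masonry', 'brick': 'masonry', 'concrete': 'masonry',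
--     'mortar': 'masonry', 'stucco': 'masonry',
--     'wood': 'wood', 'timber': 'wood', 'lumber': 'wood', 'oak': 'wood', 'pine': 'wood',
-- }
--
-- _PRIORITY = ['ceramic', 'metal', 'glass', 'composite', 'plastic', 'stone',
--              'masonry', 'wood']
--
--
-- def _get_material_category(subject: str) -> str:
--     subject_lower = subject.lower()
--     matched = {cat for term, cat in _CATEGORY_OF_TERM.items() if term in subject_lower}
--     for cat in _PRIORITY:
--         if cat in matched:
--             return cat
--     return 'material'
-- ===== Notes on version B (the rewrite author's own statement) =====
-- stated objective: alternative
-- what changed: Inverts the data layout into a flat term->category dict (the duplicate 'polymer' kept only under 'composite', its only reachable value in A) and splits the work into two stages: one pass matching every term and collecting the set of matched categories, then a priority-resolution pass picking the first matched category, instead of A's ordered per-category any() checks with early exit.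
import Mathlib
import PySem

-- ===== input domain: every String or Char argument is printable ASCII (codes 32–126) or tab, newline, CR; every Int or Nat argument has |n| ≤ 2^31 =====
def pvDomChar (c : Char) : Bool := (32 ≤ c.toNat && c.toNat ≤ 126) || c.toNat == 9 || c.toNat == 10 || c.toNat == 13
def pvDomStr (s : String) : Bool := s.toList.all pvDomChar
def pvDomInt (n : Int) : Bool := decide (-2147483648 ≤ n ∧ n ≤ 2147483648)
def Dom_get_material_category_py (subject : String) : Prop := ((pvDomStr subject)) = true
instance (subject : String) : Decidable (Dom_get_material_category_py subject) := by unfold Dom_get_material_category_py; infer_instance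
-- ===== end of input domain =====

-- ===== PORT A =====
-- literal transliteration of A's elif chain; 'term in subject_lower' = PySem.Str.isIn
def get_material_category_py (subject : String) : String :=
  let subject_lower := PySem.Str.lower subject
  if (["ceramic", "alumina", "zirconia", "porcelain", "stoneware", "kaolin"]).any
      (fun term => PySem.Str.isIn term subject_lower) then "ceramic"
  else if (["metal", "aluminum", "copper", "steel", "titanium", "gold", "silver", "brass", "bronze"]).any
      (fun term => PySem.Str.isIn term subject_lower) then "metal"
  else if (["glass", "silica", "borosilicate", "tempered"]).any
      (fun term => PySem.Str.isIn term subject_lower) then "glass"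
  else if (["composite", "fiber", "carbon", "epoxy", "polymer", "resin", "kevlar"]).any
      (fun term => PySem.Str.isIn term subject_lower) then "composite"
  else if (["plastic", "polymer", "rubber", "elastomer", "thermoplastic"]).any
      (fun term => PySem.Str.isIn term subject_lower) then "plastic"
  else if (["stone", "granite", "marble", "quartzite", "limestone"]).any
      (fun term => PySem.Str.isIn term subject_lower) then "stone"
  else if (["masonry", "brick", "concrete", "mortar", "stucco"]).any
      (fun term => PySem.Str.isIn term subject_lower) then "masonry"
  else if (["wood", "timber", "lumber", "oak", "pine"]).any
      (fun term => PySem.Str.isIn term subject_lower) then "wood"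
  else "material"

-- ===== PORT B =====
-- B: inverted term->category dict, one flat matching pass building the SET of
-- matched categories, then a priority-resolution pass; objective: alternative.
-- dict _CATEGORY_OF_TERM as an association list (insertion order)
def pvCategoryOfTerm : List (String × String) :=
  [("ceramic", "ceramic"), ("alumina", "ceramic"), ("zirconia", "ceramic"),
   ("porcelain", "ceramic"), ("stoneware", "ceramic"), ("kaolin", "ceramic"),
   ("metal", "metal"), ("aluminum", "metal"), ("copper", "metal"), ("steel", "metal"),
   ("titanium", "metal"), ("gold", "metal"), ("silver", "metal"), ("brass", "metal"),
   ("bronze", "metal"),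
   ("glass", "glass"), ("silica", "glass"), ("borosilicate", "glass"), ("tempered", "glass"),
   ("composite", "composite"), ("fiber", "composite"), ("carbon", "composite"),
   ("epoxy", "composite"), ("polymer", "composite"), ("resin", "composite"),
   ("kevlar", "composite"),
   ("plastic", "plastic"), ("rubber", "plastic"), ("elastomer", "plastic"),
   ("thermoplastic", "plastic"),
   ("stone", "stone"), ("granite", "stone"), ("marble", "stone"),
   ("quartzite", "stone"), ("limestone", "stone"),
   ("masonry", "masonry"), ("brick", "masonry"), ("concrete", "masonry"),
   ("mortar", "masonry"), ("stucco", "masonry"),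
   ("wood", "wood"), ("timber", "wood"), ("lumber", "wood"), ("oak", "wood"), ("pine", "wood")]

def pvPriority : List String :=
  ["ceramic", "metal", "glass", "composite", "plastic", "stone", "masonry", "wood"]

-- the set comprehension {cat for term, cat in items if term in subject_lower}
def pvMatched (subject_lower : String) : PySem.Set String :=
  PySem.Set.ofList
    ((pvCategoryOfTerm.filter (fun p => PySem.Str.isIn p.1 subject_lower)).map Prod.snd)

-- the 'for cat in _PRIORITY' loop with early return
def pvResolve (matched : PySem.Set String) : List String → String
  | [] => "material"
  | cat :: rest => if PySem.Set.contains matched cat then cat else pvResolve matched rest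

def get_material_category_py_alt (subject : String) : String :=
  pvResolve (pvMatched (PySem.Str.lower subject)) pvPriority

-- ===== PRECONDITION & SPEC =====
def Spec_get_material_category_py (subject : String) (out : String) : Prop := out = get_material_category_py_alt subject
instance (subject : String) (out : String) : Decidable (Spec_get_material_category_py subject out) := by unfold Spec_get_material_category_py; infer_instance

-- ===== CLAIM (what is proved, stated in full; the proofs are below) =====
def Claim_equal_get_material_category_py : Prop := ∀ (subject : String), Dom_get_material_category_py subject → Spec_get_material_category_py subject (get_material_category_py subject)

-- ===== LEMMAS AND PROOFS =====
-- membership of each category in the matched set = 'some term of that category occurs in t'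
theorem pv_mem_ceramic (t : String) :
    PySem.Set.contains (pvMatched t) "ceramic" =
      (["ceramic", "alumina", "zirconia", "porcelain", "stoneware", "kaolin"]).any (fun term => PySem.Str.isIn term t) := by
  rw [Bool.eq_iff_iff]
  simp [pvMatched, pvCategoryOfTerm, PySem.Set.contains, PySem.Set.mem_ofList,
    List.mem_map, List.mem_filter]

theorem pv_mem_metal (t : String) :
    PySem.Set.contains (pvMatched t) "metal" =
      (["metal", "aluminum", "copper", "steel", "titanium", "gold", "silver", "brass", "bronze"]).any (fun term => PySem.Str.isIn term t) := by
  rw [Bool.eq_iff_iff]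
  simp [pvMatched, pvCategoryOfTerm, PySem.Set.contains, PySem.Set.mem_ofList,
    List.mem_map, List.mem_filter]

theorem pv_mem_glass (t : String) :
    PySem.Set.contains (pvMatched t) "glass" =
      (["glass", "silica", "borosilicate", "tempered"]).any (fun term => PySem.Str.isIn term t) := by
  rw [Bool.eq_iff_iff]
  simp [pvMatched, pvCategoryOfTerm, PySem.Set.contains, PySem.Set.mem_ofList,
    List.mem_map, List.mem_filter]

theorem pv_mem_composite (t : String) :
    PySem.Set.contains (pvMatched t) "composite" =
      (["composite", "fiber", "carbon", "epoxy", "polymer", "resin", "kevlar"]).any (fun term => PySem.Str.isIn term t) := by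
  rw [Bool.eq_iff_iff]
  simp [pvMatched, pvCategoryOfTerm, PySem.Set.contains, PySem.Set.mem_ofList,
    List.mem_map, List.mem_filter]

theorem pv_mem_plastic (t : String) :
    PySem.Set.contains (pvMatched t) "plastic" =
      (["plastic", "rubber", "elastomer", "thermoplastic"]).any (fun term => PySem.Str.isIn term t) := by
  rw [Bool.eq_iff_iff]
  simp [pvMatched, pvCategoryOfTerm, PySem.Set.contains, PySem.Set.mem_ofList,
    List.mem_map, List.mem_filter]

theorem pv_mem_stone (t : String) :
    PySem.Set.contains (pvMatched t) "stone" =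
      (["stone", "granite", "marble", "quartzite", "limestone"]).any (fun term => PySem.Str.isIn term t) := by
  rw [Bool.eq_iff_iff]
  simp [pvMatched, pvCategoryOfTerm, PySem.Set.contains, PySem.Set.mem_ofList,
    List.mem_map, List.mem_filter]

theorem pv_mem_masonry (t : String) :
    PySem.Set.contains (pvMatched t) "masonry" =
      (["masonry", "brick", "concrete", "mortar", "stucco"]).any (fun term => PySem.Str.isIn term t) := by
  rw [Bool.eq_iff_iff]
  simp [pvMatched, pvCategoryOfTerm, PySem.Set.contains, PySem.Set.mem_ofList,
    List.mem_map, List.mem_filter]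

theorem pv_mem_wood (t : String) :
    PySem.Set.contains (pvMatched t) "wood" =
      (["wood", "timber", "lumber", "oak", "pine"]).any (fun term => PySem.Str.isIn term t) := by
  rw [Bool.eq_iff_iff]
  simp [pvMatched, pvCategoryOfTerm, PySem.Set.contains, PySem.Set.mem_ofList,
    List.mem_map, List.mem_filter]

theorem pv_chain_eq (subject : String) :
    get_material_category_py subject = get_material_category_py_alt subject := by
  simp only [get_material_category_py, get_material_category_py_alt, pvPriority, pvResolve,
    pv_mem_ceramic, pv_mem_metal, pv_mem_glass, pv_mem_composite, pv_mem_plastic,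
    pv_mem_stone, pv_mem_masonry, pv_mem_wood]
  simp only [List.any_cons, List.any_nil]
  split_ifs <;> simp_all

-- ===== VERDICT (by name: the statement is the Claim_ definition above) =====
theorem get_material_category_py_spec : Claim_equal_get_material_category_py := by
  intro subject _
  exact pv_chain_eq subject
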